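-- pv_equiv track=rewrite | github.com/flagboy/mahjong-table-group-generator | table_group_exact.py | _enumerate_perfect_configurations_for_players
-- ===== SOURCE A (Python) =====
-- from typing import List, Dict, Tuple, Set, Optional
-- from itertools import combinations, product
--
-- def _enumerate_perfect_configurations_for_players(players: List[int]) -> List[List[List[int]]]:
--     """特定のプレイヤーセットに対する完全な構成を列挙"""
--     if len(players) % 4 != 0:
--         return []
--
--     configs = []
--     n_tables = len(players) // 4
--
--     def generate_tables(remaining_players, current_tables):
--         if len(current_tables) == n_tables:
--             configs.append(current_tables[:])
--             return
--
--         if len(remaining_players) < 4: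
--             return
--
--         first_player = remaining_players[0]
--         for other_three in combinations(remaining_players[1:], 3):
--             table = [first_player] + list(other_three)
--             new_remaining = [p for p in remaining_players if p not in table]
--             generate_tables(new_remaining, current_tables + [table])
--
--     generate_tables(players, [])
--     return configs
-- ===== SOURCE B (Python) =====
-- from typing import List
--
--
-- def _enumerate_perfect_configurations_for_players(players: List[int]) -> List[List[List[int]]]:
--     """Different decomposition: a pure countdown recursion that RETURNS the list of
--     configurations for the remaining players (built back-to-front by prefixing the
--     chosen table), with the partner triples enumerated by three nested index loops
--     instead of itertools.combinations and with no accumulator / shared output list."""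
--     if len(players) % 4 != 0:
--         return []
--
--     def solve(tables_left, remaining):
--         if tables_left == 0:
--             return [[]]
--         if len(remaining) < 4:
--             return []
--         first, rest = remaining[0], remaining[1:]
--         m = len(rest)
--         result = []
--         for i in range(m):
--             for j in range(i + 1, m):
--                 for k in range(j + 1, m):
--                     table = [first, rest[i], rest[j], rest[k]]
--                     sub = [p for p in remaining if p not in table]
--                     for cfg in solve(tables_left - 1, sub):
--                         result.append([table] + cfg)
--         return result
--
--     return solve(len(players) // 4, players)
-- ===== Notes on version B (the rewrite author's own statement) =====
-- stated objective: alternative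
-- what changed: Replaces the backtracking recursion with a shared configs output list, a current_tables accumulator parameter and itertools.combinations by a pure countdown recursion that returns the configuration list for the remaining players (built back-to-front by prefixing the chosen table), enumerating partner triples with three nested index loops.
import Mathlib
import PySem

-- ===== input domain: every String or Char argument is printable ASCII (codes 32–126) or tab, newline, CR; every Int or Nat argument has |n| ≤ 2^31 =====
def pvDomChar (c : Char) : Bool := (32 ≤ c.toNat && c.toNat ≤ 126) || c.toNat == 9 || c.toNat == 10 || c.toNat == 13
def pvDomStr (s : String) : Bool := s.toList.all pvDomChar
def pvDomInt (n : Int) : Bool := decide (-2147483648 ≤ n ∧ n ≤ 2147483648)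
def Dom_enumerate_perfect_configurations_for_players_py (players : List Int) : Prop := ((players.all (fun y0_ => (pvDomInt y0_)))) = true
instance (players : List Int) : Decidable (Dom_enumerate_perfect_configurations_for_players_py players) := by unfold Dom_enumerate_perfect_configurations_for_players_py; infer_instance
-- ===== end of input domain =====

-- B replaces the recursive backtracking with an accumulator (configs side list,
-- current_tables parameter, itertools.combinations) by a pure countdown recursion
-- that returns the configurations of the remaining players, prefixing the chosen
-- table, with the partner triples produced by three nested index loops; alternative
-- decomposition, same cost.

-- ===== PORT A =====
-- itertools.combinations(l, 3) in Python's lexicographic-index order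
def combosPy (n : Nat) (l : List Int) : List (List Int) :=
  match n, l with
  | 0, _ => [[]]
  | _ + 1, [] => []
  | n + 1, x :: xs => (combosPy n xs).map (fun c => x :: c) ++ combosPy (n + 1) xs

-- the inner recursive generate_tables; returns the list of configs it appends, in order
def genTablesA (nTables : Nat) (remaining : List Int) (current : List (List Int)) :
    List (List (List Int)) :=
  if current.length == nTables then [current]
  else if remaining.length < 4 then []
  else
    match remaining with
    | [] => []
    | f :: rest =>
      (combosPy 3 rest).flatMap (fun three =>
        genTablesA nTables
          ((f :: rest).filter (fun p => !((f :: three).contains p)))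
          (current ++ [f :: three]))
termination_by remaining.length
decreasing_by
  simp only [List.filter_cons, List.contains_cons, BEq.rfl, Bool.true_or, Bool.not_true,
    List.length_cons]
  exact Nat.lt_succ_of_le (List.length_filter_le _ _)

def enumerate_perfect_configurations_for_players_py (players : List Int) :
    List (List (List Int)) :=
  if players.length % 4 != 0 then []
  else genTablesA (players.length / 4) players []

-- ===== PORT B =====
-- solve(tables_left, remaining): the three nested index loops become three nested
-- flatMaps over the corresponding ranges; rest[i] is rest.getD i 0 (indices are in range)
def solveB (tablesLeft : Nat) (remaining : List Int) : List (List (List Int)) :=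
  match tablesLeft with
  | 0 => [[]]
  | t + 1 =>
    if remaining.length < 4 then []
    else
      match remaining with
      | [] => []
      | first :: rest =>
        let m := rest.length
        (List.range m).flatMap (fun i =>
          (List.range' (i + 1) (m - (i + 1))).flatMap (fun j =>
            (List.range' (j + 1) (m - (j + 1))).flatMap (fun k =>
              let three := [rest.getD i 0, rest.getD j 0, rest.getD k 0]
              let table := first :: three
              (solveB t ((first :: rest).filter (fun p => !table.contains p))).map
                (fun cfg => table :: cfg))))

def enumerate_perfect_configurations_for_players_py_alt (players : List Int) :
    List (List (List Int)) :=
  if players.length % 4 != 0 then []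
  else solveB (players.length / 4) players

-- ===== PRECONDITION & SPEC =====
def Spec_enumerate_perfect_configurations_for_players_py (players : List Int) (out : List (List (List Int))) : Prop := out = enumerate_perfect_configurations_for_players_py_alt players
instance (players : List Int) (out : List (List (List Int))) : Decidable (Spec_enumerate_perfect_configurations_for_players_py players out) := by unfold Spec_enumerate_perfect_configurations_for_players_py; infer_instance

-- ===== CLAIM (what is proved, stated in full; the proofs are below) =====
def Claim_equal_enumerate_perfect_configurations_for_players_py : Prop := ∀ (players : List Int), Dom_enumerate_perfect_configurations_for_players_py players → Spec_enumerate_perfect_configurations_for_players_py players (enumerate_perfect_configurations_for_players_py players)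

-- ===== LEMMAS AND PROOFS =====

-- level-1 loop: a range' loop over indices ≥ off reads off the suffix l.drop off
theorem loop1_eq_drop {α : Type} (g : Int → List α) (l : List Int) (off : Nat) :
    (List.range' off (l.length - off)).flatMap (fun k => g (l.getD k 0)) =
      (l.drop off).flatMap g := by
  induction h : l.length - off generalizing off with
  | zero =>
    have : l.length ≤ off := by omega
    simp [List.drop_eq_nil_of_le this]
  | succ n ih =>
    have hlt : off < l.length := by omega
    rw [List.range'_succ, List.flatMap_cons,
      List.drop_eq_getElem_cons hlt, List.flatMap_cons,
      List.getD_eq_getElem l 0 hlt, ih (off + 1) (by omega)]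

-- level-2 loop: two nested index loops from off = combosPy 2 of the suffix
theorem loop2_eq_combos {α : Type} (g : List Int → List α) (l : List Int) (off : Nat) :
    (List.range' off (l.length - off)).flatMap (fun j =>
        (List.range' (j + 1) (l.length - (j + 1))).flatMap (fun k =>
          g [l.getD j 0, l.getD k 0])) =
      (combosPy 2 (l.drop off)).flatMap g := by
  induction h : l.length - off generalizing off with
  | zero =>
    have : l.length ≤ off := by omega
    simp [List.drop_eq_nil_of_le this, combosPy]
  | succ n ih =>
    have hlt : off < l.length := by omega
    rw [List.range'_succ, List.flatMap_cons, List.drop_eq_getElem_cons hlt,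
      ih (off + 1) (by omega),
      loop1_eq_drop (fun a => g [l.getD off 0, a]) l (off + 1)]
    simp only [combosPy, List.flatMap_append, List.flatMap_map,
      List.getD_eq_getElem l 0 hlt]
    congr 1
    · induction (l.drop (off + 1)) with
      | nil => rfl
      | cons x xs ihx =>
        simp only [List.flatMap_cons, combosPy, List.flatMap_append,
          List.flatMap_map] at *
        simp [ihx]

-- level-3 loop: three nested index loops over all of l = combosPy 3 l
theorem loop3_eq_combos {α : Type} (g : List Int → List α) (l : List Int) :
    (List.range l.length).flatMap (fun i =>
        (List.range' (i + 1) (l.length - (i + 1))).flatMap (fun j =>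
          (List.range' (j + 1) (l.length - (j + 1))).flatMap (fun k =>
            g [l.getD i 0, l.getD j 0, l.getD k 0]))) =
      (combosPy 3 l).flatMap g := by
  have main : ∀ off : Nat,
      (List.range' off (l.length - off)).flatMap (fun i =>
          (List.range' (i + 1) (l.length - (i + 1))).flatMap (fun j =>
            (List.range' (j + 1) (l.length - (j + 1))).flatMap (fun k =>
              g [l.getD i 0, l.getD j 0, l.getD k 0]))) =
        (combosPy 3 (l.drop off)).flatMap g := by
    intro off
    induction h : l.length - off generalizing off with
    | zero =>
      have : l.length ≤ off := by omega
      simp [List.drop_eq_nil_of_le this, combosPy]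
    | succ n ih =>
      have hlt : off < l.length := by omega
      rw [List.range'_succ, List.flatMap_cons, List.drop_eq_getElem_cons hlt,
        ih (off + 1) (by omega),
        loop2_eq_combos (fun bc => g (l.getD off 0 :: bc)) l (off + 1)]
      simp only [combosPy, List.flatMap_append, List.flatMap_map,
        List.getD_eq_getElem l 0 hlt]
  have h0 := main 0
  simpa [List.range_eq_range'] using h0

-- main bridge: the accumulator recursion equals the countdown recursion with the
-- accumulated prefix mapped back on
theorem genTablesA_eq_solveB (n k : Nat) (rem : List Int) (cur : List (List Int))
    (h : cur.length + k = n) :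
    genTablesA n rem cur = (solveB k rem).map (fun cfg => cur ++ cfg) := by
  induction k generalizing rem cur with
  | zero =>
    rw [genTablesA.eq_def]
    simp_all [solveB]
  | succ k ih =>
    have hne : (cur.length == n) = false := by
      simp only [beq_eq_false_iff_ne]; omega
    rw [genTablesA.eq_def]
    simp only [solveB]
    simp only [hne, Bool.false_eq_true, if_false]
    by_cases h4 : rem.length < 4
    · simp [h4]
    · match rem with
      | [] => simp at h4
      | f :: rest =>
        rw [if_neg h4, if_neg h4]
        simp only []
        rw [loop3_eq_combos (fun three =>
          (solveB k ((f :: rest).filter (fun p => !((f :: three).contains p)))).map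
            (fun cfg => (f :: three) :: cfg)) rest]
        simp only [List.map_flatMap]
        refine List.flatMap_congr (fun three _ => ?_)
        rw [ih _ _ (by simp; omega)]
        simp [List.map_map, Function.comp]

-- ===== VERDICT (by name: the statement is the Claim_ definition above) =====
theorem enumerate_perfect_configurations_for_players_py_spec : Claim_equal_enumerate_perfect_configurations_for_players_py := by
  intro players _
  unfold Spec_enumerate_perfect_configurations_for_players_py
    enumerate_perfect_configurations_for_players_py
    enumerate_perfect_configurations_for_players_py_alt
  by_cases h : players.length % 4 != 0
  · simp [h]
  · simp only [h]
    rw [genTablesA_eq_solveB (players.length / 4) (players.length / 4) players [] (by simp)]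
    simp
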